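-- pv_equiv track=rewrite | github.com/daniel-reich/ubiquitous-fiesta | sARz4TDdxCuqK6pja_8.py | deadly_virus
-- ===== SOURCE A (Python) =====
-- def deadly_virus(persons, n):
--   temp = [i[:] for i in persons]
--   for h in range(n):
--     for i in range(len(temp)):
--       for j in range(len(temp[0])):
--         if persons[i][j]=='V':
--           temp[max(i-1,0)][j] = 'V'
--           temp[min(len(temp)-1,i+1)][j] = 'V'
--           temp[i][max(j-1,0)] = 'V'
--           temp[i][min(len(temp[0])-1,j+1)] = 'V'
--     persons = [i[:] for i in temp]
--   return persons
-- ===== SOURCE B (Python) =====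
-- def deadly_virus(persons, n):
--     # Closed form: after n steps a cell is infected iff its Manhattan distance
--     # to some initially infected cell is at most n.
--     sources = [(i, j) for i, row in enumerate(persons)
--                for j, c in enumerate(row) if c == 'V']
--     return [['V' if any(abs(i - a) + abs(j - b) <= n for a, b in sources) else c
--              for j, c in enumerate(row)]
--             for i, row in enumerate(persons)]
-- ===== Notes on version B (the rewrite author's own statement) =====
-- stated objective: faster
-- what changed: B replaces A's n-round cellular simulation by a closed form (a cell is 'V' iff its Manhattan distance to some initial 'V' is at most n); Pre_ restricts to the natural domain of rectangular grids (or n <= 0, where A copies): on ragged grids A either raises IndexError (a row shorter than the first) or accidentally leaves columns beyond the first row's width uninfected.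
-- outside the precondition, e.g. on deadly_virus([['V'], ['P', 'P']], 2): A returns [['V'], ['V', 'P']], B returns [['V'], ['V', 'V']]; on deadly_virus([['V', 'P'], ['P']], 1): A raises IndexError, B returns [['V', 'V'], ['V']]
import Mathlib
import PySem

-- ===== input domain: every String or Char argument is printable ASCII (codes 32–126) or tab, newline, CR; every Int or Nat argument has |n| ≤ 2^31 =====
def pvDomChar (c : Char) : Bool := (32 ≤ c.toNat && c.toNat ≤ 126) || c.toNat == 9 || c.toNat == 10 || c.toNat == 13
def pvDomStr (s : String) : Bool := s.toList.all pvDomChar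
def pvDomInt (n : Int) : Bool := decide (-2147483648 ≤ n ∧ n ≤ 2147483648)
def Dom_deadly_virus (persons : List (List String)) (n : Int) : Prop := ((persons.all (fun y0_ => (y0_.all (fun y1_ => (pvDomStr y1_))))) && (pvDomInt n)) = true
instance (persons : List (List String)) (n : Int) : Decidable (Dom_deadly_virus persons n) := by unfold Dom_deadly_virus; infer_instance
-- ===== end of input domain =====

-- B replaces the n-round grid simulation by a Manhattan-distance closed form (no time loop); equivalence is proved on rectangular grids (or n ≤ 0), the function's natural domain.

-- ===== PORT A =====
-- temp[i][j] = 'V'  (writes out of range never happen on Pre_ inputs; List.set/modify are no-ops there)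
def pvSet2 (g : List (List String)) (i j : Nat) : List (List String) :=
  g.modify i (fun row => row.set j "V")

-- persons[i][j] read (always in range on Pre_ inputs where it is evaluated)
def pvGet2 (g : List (List String)) (i j : Nat) : String :=
  (g.getD i []).getD j ""

-- the four assignment statements under "if persons[i][j]=='V':"
def pvInfect (t : List (List String)) (i j : Nat) : List (List String) :=
  let t1 := pvSet2 t (i - 1) j                                   -- temp[max(i-1,0)][j] = 'V'
  let t2 := pvSet2 t1 (min (t1.length - 1) (i + 1)) j            -- temp[min(len(temp)-1,i+1)][j] = 'V'
  let t3 := pvSet2 t2 i (j - 1)                                  -- temp[i][max(j-1,0)] = 'V'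
  pvSet2 t3 i (min ((t3.headD []).length - 1) (j + 1))           -- temp[i][min(len(temp[0])-1,j+1)] = 'V'

-- the body of "for h in range(n)": the two nested index loops writing into temp
def pvStep (persons temp : List (List String)) : List (List String) :=
  (List.range temp.length).foldl (fun t i =>
    (List.range ((t.headD []).length)).foldl (fun t j =>
      if pvGet2 persons i j = "V" then pvInfect t i j else t) t) temp

def deadly_virus (persons : List (List String)) (n : Int) : List (List String) :=
  let temp := persons.map (fun i => i)                           -- [i[:] for i in persons]
  ((PySem.List.pyRange 0 n 1).foldl
    (fun st _h =>
      let temp' := pvStep st.1 st.2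
      (temp'.map (fun i => i), temp'))                           -- persons = [i[:] for i in temp]
    (persons, temp)).1

-- ===== PORT B =====
def deadly_virus_alt (persons : List (List String)) (n : Int) : List (List String) :=
  let sources := (PySem.List.enumerate persons).flatMap (fun p =>
    (PySem.List.enumerate p.2).filterMap (fun q =>
      if q.2 = "V" then some (p.1, q.1) else none))
  (PySem.List.enumerate persons).map (fun p =>
    (PySem.List.enumerate p.2).map (fun q =>
      if sources.any (fun s =>
          decide ((((p.1 - s.1).natAbs : Nat) + ((q.1 - s.2).natAbs : Nat) : Int) ≤ n))
       then "V" else q.2))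

-- ===== PRECONDITION & SPEC =====
-- Pre_ restricts to the task's natural domain, rectangular grids (or n ≤ 0, where A just copies):
-- on ragged grids A either raises IndexError (a row shorter than the first) or accidentally
-- leaves columns beyond the first row's width uninfected.
def Pre_deadly_virus (persons : List (List String)) (n : Int) : Prop :=
  n ≤ 0 ∨ ∀ row ∈ persons, row.length = (persons.headD []).length
instance (persons : List (List String)) (n : Int) : Decidable (Pre_deadly_virus persons n) := by
  unfold Pre_deadly_virus; infer_instance

def pvWitness_deadly_virus : List (List String) × Int := ([["V", "P"], ["P", "P"]], 1)

def Spec_deadly_virus (persons : List (List String)) (n : Int) (out : List (List String)) : Prop := out = deadly_virus_alt persons n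
instance (persons : List (List String)) (n : Int) (out : List (List String)) : Decidable (Spec_deadly_virus persons n out) := by unfold Spec_deadly_virus; infer_instance

-- ===== CLAIM (what is proved, stated in full; the proofs are below) =====
def Claim_equal_deadly_virus : Prop := ∀ (persons : List (List String)) (n : Int), Dom_deadly_virus persons n → Pre_deadly_virus persons n → Spec_deadly_virus persons n (deadly_virus persons n)

-- ===== LEMMAS AND PROOFS =====

-- |a - b| on Nat
def pvDist (a b : Nat) : Nat := (a - b) + (b - a)

-- shape of g matches persons (same length, same row lengths pointwise)
def pvSh (persons g : List (List String)) : Prop :=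
  g.length = persons.length ∧ ∀ k, (g.getD k []).length = (persons.getD k []).length

-- all rows at least as long as the first
def pvRect (persons : List (List String)) : Prop :=
  ∀ row ∈ persons, (persons.headD []).length ≤ row.length

-- cell (i,j) is within distance m of an initial 'V'
abbrev pvInf (persons : List (List String)) (m i j : Nat) : Prop :=
  ∃ a ∈ List.range persons.length, ∃ b ∈ List.range (persons.headD []).length,
    pvGet2 persons a b = "V" ∧ pvDist i a + pvDist j b ≤ m

-- the four clamped write targets of a 'V' at (a,b), in an R × W grid
abbrev pvTgt (R W a b x y : Nat) : Prop :=
  (x = a - 1 ∧ y = b) ∨ (x = min (R - 1) (a + 1) ∧ y = b) ∨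
  (x = a ∧ y = b - 1) ∨ (x = a ∧ y = min (W - 1) (b + 1))

theorem pvHeadD_eq_getD (l : List (List String)) : l.headD [] = l.getD 0 [] := by
  cases l <;> rfl

theorem pvSh_refl (p : List (List String)) : pvSh p p := ⟨rfl, fun _ => rfl⟩

theorem pvSet2_length (g : List (List String)) (a b : Nat) :
    (pvSet2 g a b).length = g.length := by
  simp [pvSet2]

theorem pvSet2_rowlen (g : List (List String)) (a b k : Nat) :
    ((pvSet2 g a b).getD k []).length = (g.getD k []).length := by
  simp [pvSet2, List.getD_eq_getElem?_getD, List.getElem?_modify]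
  cases g[k]? with
  | none => simp
  | some row => simp; split <;> simp

theorem pvSh_pvSet2 (p g : List (List String)) (a b : Nat) (h : pvSh p g) :
    pvSh p (pvSet2 g a b) := by
  obtain ⟨h1, h2⟩ := h
  exact ⟨by rw [pvSet2_length, h1], fun k => by rw [pvSet2_rowlen, h2]⟩

theorem pvGet2_pvSet2 (g : List (List String)) (a b : Nat)
    (ha : a < g.length) (hb : b < (g.getD a []).length) (x y : Nat) :
    pvGet2 (pvSet2 g a b) x y = if x = a ∧ y = b then "V" else pvGet2 g x y := by
  simp only [pvGet2, pvSet2, List.getD_eq_getElem?_getD, List.getElem?_modify]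
  by_cases hx : x = a
  · subst hx
    have hsome : g[x]? = some (g.getD x []) := by
      rw [List.getD_eq_getElem?_getD]
      cases h : g[x]? with
      | none => exact absurd (List.getElem?_eq_none_iff.mp h) (by omega)
      | some r => simp
    rw [hsome]
    simp only [Option.map_eq_map, Option.map_some, Option.getD_some, true_and, if_pos trivial]
    rw [List.getElem?_set]
    by_cases hy : y = b
    · subst hy
      simp only [List.getD_eq_getElem?_getD] at hb ⊢
      simp [show y < (g[x]?.getD []).length from hb]
    · simp [Ne.symm hy, hy]
  · simp [Ne.symm hx, hx]

theorem pvSh_headlen (p t : List (List String)) (hs : pvSh p t) :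
    (t.headD []).length = (p.headD []).length := by
  rw [pvHeadD_eq_getD, pvHeadD_eq_getD, hs.2 0]

-- every row index < length has row length ≥ W, given pvRect and pvSh
theorem pvRowlen_ge (p g : List (List String)) (hs : pvSh p g) (hr : pvRect p)
    (k : Nat) (hk : k < g.length) :
    (p.headD []).length ≤ (g.getD k []).length := by
  obtain ⟨h1, h2⟩ := hs
  rw [h2]
  have hk' : k < p.length := h1 ▸ hk
  rw [List.getD_eq_getElem?_getD, List.getElem?_eq_getElem hk']
  exact hr _ (List.getElem_mem hk')

theorem pvInfect_char (p g : List (List String)) (hs : pvSh p g) (hr : pvRect p)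
    (a b : Nat) (ha : a < g.length) (hb : b < (p.headD []).length) :
    pvSh p (pvInfect g a b) ∧
    ∀ x y, pvGet2 (pvInfect g a b) x y =
      if pvTgt p.length (p.headD []).length a b x y then "V" else pvGet2 g x y := by
  have hs1 : pvSh p (pvSet2 g (a - 1) b) := pvSh_pvSet2 p g _ _ hs
  set t1 := pvSet2 g (a - 1) b with ht1
  have hs2 : pvSh p (pvSet2 t1 (min (t1.length - 1) (a + 1)) b) := pvSh_pvSet2 p t1 _ _ hs1
  set t2 := pvSet2 t1 (min (t1.length - 1) (a + 1)) b with ht2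
  have hs3 : pvSh p (pvSet2 t2 a (b - 1)) := pvSh_pvSet2 p t2 _ _ hs2
  set t3 := pvSet2 t2 a (b - 1) with ht3
  have hs4 : pvSh p (pvSet2 t3 a (min ((t3.headD []).length - 1) (b + 1))) :=
    pvSh_pvSet2 p t3 _ _ hs3
  have hl1 : t1.length = g.length := pvSet2_length g _ _
  have hl2 : t2.length = g.length := by rw [ht2, pvSet2_length, hl1]
  have hl3 : t3.length = g.length := by rw [ht3, pvSet2_length, hl2]
  have hRg : g.length = p.length := hs.1
  have hhd3 : (t3.headD []).length = (p.headD []).length := pvSh_headlen p t3 hs3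
  refine ⟨by rw [pvInfect]; exact hs4, fun x y => ?_⟩
  have e4 : pvGet2 (pvInfect g a b) x y =
      if x = a ∧ y = min ((p.headD []).length - 1) (b + 1) then "V" else pvGet2 t3 x y := by
    rw [pvInfect, ← hhd3]
    exact pvGet2_pvSet2 t3 a _ (by omega)
      (lt_of_lt_of_le (by rw [hhd3]; omega) (pvRowlen_ge p t3 hs3 hr a (by omega))) x y
  have e3 : pvGet2 t3 x y = if x = a ∧ y = b - 1 then "V" else pvGet2 t2 x y :=
    pvGet2_pvSet2 t2 a _ (by omega)
      (lt_of_lt_of_le (by omega) (pvRowlen_ge p t2 hs2 hr a (by omega))) x y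
  have e2 : pvGet2 t2 x y =
      if x = min (g.length - 1) (a + 1) ∧ y = b then "V" else pvGet2 t1 x y := by
    rw [ht2, hl1]
    exact pvGet2_pvSet2 t1 _ b (by omega)
      (lt_of_lt_of_le hb (pvRowlen_ge p t1 hs1 hr _ (by omega))) x y
  have e1 : pvGet2 t1 x y = if x = a - 1 ∧ y = b then "V" else pvGet2 g x y :=
    pvGet2_pvSet2 g _ b (by omega)
      (lt_of_lt_of_le hb (pvRowlen_ge p g hs hr _ (by omega))) x y
  rw [e4, e3, e2, e1, hRg]
  by_cases h : pvTgt p.length (p.headD []).length a b x y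
  · rw [if_pos h]
    rcases h with ⟨h1, h2⟩ | ⟨h1, h2⟩ | ⟨h1, h2⟩ | ⟨h1, h2⟩ <;> subst h1 <;> subst h2 <;>
      simp [← hRg]
  · rw [if_neg h]
    have n1 : ¬(x = a - 1 ∧ y = b) := fun hc => h (Or.inl hc)
    have n2 : ¬(x = min (p.length - 1) (a + 1) ∧ y = b) := fun hc => h (Or.inr (Or.inl hc))
    have n3 : ¬(x = a ∧ y = b - 1) := fun hc => h (Or.inr (Or.inr (Or.inl hc)))
    have n4 : ¬(x = a ∧ y = min ((p.headD []).length - 1) (b + 1)) :=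
      fun hc => h (Or.inr (Or.inr (Or.inr hc)))
    rw [if_neg n4, if_neg n3, if_neg n2, if_neg n1]

-- generic write-loop characterisation
theorem pvFoldl_write (S : List (List String) → Prop)
    (f : List (List String) → Nat → List (List String))
    (P : Nat → Nat → Nat → Prop) [∀ k x y, Decidable (P k x y)]
    (L : List Nat)
    (hf : ∀ k ∈ L, ∀ t, S t → S (f t k) ∧
      ∀ x y, pvGet2 (f t k) x y = if P k x y then "V" else pvGet2 t x y) :
    ∀ t, S t → S (L.foldl f t) ∧
      ∀ x y, pvGet2 (L.foldl f t) x y =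
        if ∃ k ∈ L, P k x y then "V" else pvGet2 t x y := by
  induction L with
  | nil => intro t ht; exact ⟨ht, fun x y => by simp⟩
  | cons k L ih =>
    intro t ht
    have hfk := hf k (List.mem_cons_self) t ht
    have ih' := ih (fun k' hk' => hf k' (List.mem_cons_of_mem _ hk')) (f t k) hfk.1
    refine ⟨ih'.1, fun x y => ?_⟩
    simp only [List.foldl_cons]
    rw [ih'.2 x y, hfk.2 x y]
    by_cases h1 : P k x y <;> by_cases h2 : ∃ k' ∈ L, P k' x y <;>
      simp [h1, h2]

theorem pvStep_char (p g : List (List String)) (hs : pvSh p g) (hr : pvRect p) :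
    pvSh p (pvStep g g) ∧
    ∀ x y, pvGet2 (pvStep g g) x y =
      if ∃ a ∈ List.range p.length, ∃ b ∈ List.range (p.headD []).length,
          pvGet2 g a b = "V" ∧ pvTgt p.length (p.headD []).length a b x y
      then "V" else pvGet2 g x y := by
  have hg : g.length = p.length := hs.1
  simp only [pvStep]
  rw [hg]
  exact pvFoldl_write (pvSh p) _
    (fun i x y => ∃ b ∈ List.range (p.headD []).length,
      pvGet2 g i b = "V" ∧ pvTgt p.length (p.headD []).length i b x y)
    (List.range p.length)
    (fun i hi t ht => by
      rw [pvSh_headlen p t ht]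
      exact pvFoldl_write (pvSh p) _
        (fun j x y => pvGet2 g i j = "V" ∧ pvTgt p.length (p.headD []).length i j x y)
        (List.range (p.headD []).length)
        (fun j hj t' ht' => by
          by_cases hv : pvGet2 g i j = "V"
          · simp only [if_pos hv]
            obtain ⟨hSh, hForm⟩ := pvInfect_char p t' ht' hr i j
              (by rw [ht'.1]; exact List.mem_range.mp hi) (List.mem_range.mp hj)
            exact ⟨hSh, fun x y => by rw [hForm x y]; simp [hv]⟩
          · simp only [if_neg hv]
            exact ⟨ht', fun x y => by simp [hv]⟩)
        t ht)
    g hs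

-- spread by one step = distance bound grows by one
theorem pvInf_succ (p : List (List String)) (_hr : pvRect p) (m x y : Nat)
    (hx : x < p.length) (hy : y < (p.headD []).length) :
    pvInf p (m + 1) x y ↔
      pvInf p m x y ∨
      ∃ a ∈ List.range p.length, ∃ b ∈ List.range (p.headD []).length,
        pvInf p m a b ∧ pvTgt p.length (p.headD []).length a b x y := by
  simp only [pvInf, pvTgt, List.mem_range]
  constructor
  · rintro ⟨s, hsR, t, htW, hsrc, hd⟩
    by_cases hm : pvDist x s + pvDist y t ≤ m
    · exact Or.inl ⟨s, hsR, t, htW, hsrc, hm⟩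
    · refine Or.inr ?_
      rcases Nat.lt_trichotomy x s with hlt | heq | hgt
      · exact ⟨x + 1, by omega, y, hy, ⟨s, hsR, t, htW, hsrc, by simp [pvDist] at *; omega⟩,
          Or.inl ⟨by omega, rfl⟩⟩
      · subst heq
        rcases Nat.lt_trichotomy y t with hlt' | heq' | hgt'
        · exact ⟨x, hx, y + 1, by omega, ⟨x, hsR, t, htW, hsrc, by simp [pvDist] at *; omega⟩,
            Or.inr (Or.inr (Or.inl ⟨rfl, by omega⟩))⟩
        · exact absurd hm (by subst heq'; simp [pvDist])
        · exact ⟨x, hx, y - 1, by omega, ⟨x, hsR, t, htW, hsrc, by simp [pvDist] at *; omega⟩,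
            Or.inr (Or.inr (Or.inr ⟨rfl, by omega⟩))⟩
      · exact ⟨x - 1, by omega, y, hy, ⟨s, hsR, t, htW, hsrc, by simp [pvDist] at *; omega⟩,
          Or.inr (Or.inl ⟨by omega, rfl⟩)⟩
  · rintro (⟨s, hsR, t, htW, hsrc, hd⟩ | ⟨a, haR, b, hbW, ⟨s, hsR, t, htW, hsrc, hd⟩, htgt⟩)
    · exact ⟨s, hsR, t, htW, hsrc, by omega⟩
    · refine ⟨s, hsR, t, htW, hsrc, ?_⟩
      rcases htgt with ⟨h1, h2⟩ | ⟨h1, h2⟩ | ⟨h1, h2⟩ | ⟨h1, h2⟩ <;> subst h1 <;> subst h2 <;>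
        simp [pvDist] at * <;> omega

theorem pvTgt_bounds (R W a b x y : Nat) (haR : a < R) (hbW : b < W)
    (h : pvTgt R W a b x y) : x < R ∧ y < W := by
  rcases h with ⟨h1, h2⟩ | ⟨h1, h2⟩ | ⟨h1, h2⟩ | ⟨h1, h2⟩ <;> subst h1 <;> subst h2 <;> omega

-- main invariant: after m steps the grid is "V on distance ≤ m, original elsewhere"
theorem pvIter_char (p : List (List String)) (hr : pvRect p) (m : Nat) :
    pvSh p ((fun g => pvStep g g)^[m] p) ∧
    ∀ x y, pvGet2 ((fun g => pvStep g g)^[m] p) x y =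
      if x < p.length ∧ y < (p.headD []).length ∧ pvInf p m x y
      then "V" else pvGet2 p x y := by
  induction m with
  | zero =>
    refine ⟨by simpa using pvSh_refl p, fun x y => ?_⟩
    simp only [Function.iterate_zero_apply]
    by_cases h : x < p.length ∧ y < (p.headD []).length ∧ pvInf p 0 x y
    · rw [if_pos h]
      have hinf := h.2.2
      simp only [pvInf, List.mem_range] at hinf
      obtain ⟨a, ha, b, hb, hsrc, hd⟩ := hinf
      have h1 : a = x := by simp [pvDist] at hd; omega
      have h2 : b = y := by simp [pvDist] at hd; omega
      rw [h1, h2] at hsrc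
      exact hsrc
    · rw [if_neg h]
  | succ m ih =>
    obtain ⟨hSh, hForm⟩ := ih
    rw [Function.iterate_succ_apply']
    obtain ⟨hSh', hF'⟩ := pvStep_char p _ hSh hr
    refine ⟨hSh', fun x y => ?_⟩
    rw [hF' x y]
    have hVa : ∀ a b, a < p.length → b < (p.headD []).length →
        (pvGet2 ((fun g => pvStep g g)^[m] p) a b = "V" ↔ pvInf p m a b) := by
      intro a b haR hbW
      rw [hForm a b]
      constructor
      · intro hv
        by_cases hc : a < p.length ∧ b < (p.headD []).length ∧ pvInf p m a b
        · exact hc.2.2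
        · rw [if_neg hc] at hv
          exact ⟨a, List.mem_range.mpr haR, b, List.mem_range.mpr hbW, hv, by simp [pvDist]⟩
      · intro hinf
        rw [if_pos ⟨haR, hbW, hinf⟩]
    by_cases hxy : x < p.length ∧ y < (p.headD []).length
    · have hsucc := pvInf_succ p hr m x y hxy.1 hxy.2
      by_cases hw : ∃ a ∈ List.range p.length, ∃ b ∈ List.range (p.headD []).length,
          pvGet2 ((fun g => pvStep g g)^[m] p) a b = "V" ∧
          pvTgt p.length (p.headD []).length a b x y
      · rw [if_pos hw]
        obtain ⟨a, ha, b, hb, hv, htgt⟩ := hw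
        have hinf : pvInf p (m + 1) x y := hsucc.mpr (Or.inr ⟨a, ha, b, hb,
          (hVa a b (List.mem_range.mp ha) (List.mem_range.mp hb)).mp hv, htgt⟩)
        rw [if_pos ⟨hxy.1, hxy.2, hinf⟩]
      · rw [if_neg hw, hForm x y]
        by_cases hm : pvInf p m x y
        · rw [if_pos ⟨hxy.1, hxy.2, hm⟩, if_pos ⟨hxy.1, hxy.2, hsucc.mpr (Or.inl hm)⟩]
        · rw [if_neg (fun hc => hm hc.2.2), if_neg]
          intro hc
          rcases hsucc.mp hc.2.2 with h | ⟨a, ha, b, hb, hia, htgt⟩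
          · exact hm h
          · exact hw ⟨a, ha, b, hb,
              (hVa a b (List.mem_range.mp ha) (List.mem_range.mp hb)).mpr hia, htgt⟩
    · have hnw : ¬ ∃ a ∈ List.range p.length, ∃ b ∈ List.range (p.headD []).length,
          pvGet2 ((fun g => pvStep g g)^[m] p) a b = "V" ∧
          pvTgt p.length (p.headD []).length a b x y := by
        rintro ⟨a, ha, b, hb, -, htgt⟩
        exact hxy (pvTgt_bounds _ _ _ _ _ _ (List.mem_range.mp ha) (List.mem_range.mp hb) htgt)
      rw [if_neg hnw, hForm x y, if_neg (fun hc => hxy ⟨hc.1, hc.2.1⟩),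
        if_neg (fun hc => hxy ⟨hc.1, hc.2.1⟩)]

theorem pvFold_iter (L : List Int) : ∀ g : List (List String),
    (L.foldl (fun st (_ : Int) =>
      (pvStep st.1 st.2, pvStep st.1 st.2)) (g, g)).1 =
    (fun g => pvStep g g)^[L.length] g := by
  induction L with
  | nil => intro g; rfl
  | cons k L ih =>
    intro g
    simp only [List.foldl_cons]
    rw [List.length_cons, Function.iterate_succ_apply]
    exact ih (pvStep g g)

-- A's fold is iteration of the step
theorem pvA_eq_iter (p : List (List String)) (n : Int) :
    deadly_virus p n = (fun g => pvStep g g)^[n.toNat] p := by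
  simp only [deadly_virus, List.map_id']
  rw [pvFold_iter, PySem.List.length_pyRange_one]
  norm_num

-- the distance condition B tests, as a Prop
abbrev pvBC (p : List (List String)) (n : Int) (i j : Nat) : Prop :=
  ∃ a ∈ List.range p.length, ∃ b ∈ List.range (p.getD a []).length,
    (p.getD a []).getD b "" = "V" ∧ ((pvDist i a + pvDist j b : Nat) : Int) ≤ n

theorem pvDist_natAbs (i a : Nat) : ((i : Int) - (a : Int)).natAbs = pvDist i a := by
  simp [pvDist]; omega

theorem pvGetD_row (p : List (List String)) (i : Nat) (hi : i < p.length) :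
    p.getD i [] = p[i] := by
  rw [List.getD_eq_getElem?_getD, List.getElem?_eq_getElem hi]; rfl

theorem pvGetD_cell (row : List String) (j : Nat) (hj : j < row.length) :
    row.getD j "" = row[j] := by
  rw [List.getD_eq_getElem?_getD, List.getElem?_eq_getElem hj]; rfl

theorem pvAny_iff (p : List (List String)) (n : Int) (i j : Nat) :
    ((List.flatMap
        (fun pr => List.filterMap
          (fun q => if q.2 = "V" then some (pr.1, q.1) else none)
          (PySem.List.enumerate pr.2))
        (PySem.List.enumerate p)).any
      fun s => decide (((((0:Int) + (i : Int) - s.1).natAbs : Nat) +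
        ((((0:Int) + (j : Int)) - s.2).natAbs : Nat) : Int) ≤ n)) = true
    ↔ pvBC p n i j := by
  rw [List.any_eq_true]
  simp only [List.mem_flatMap, List.mem_filterMap, PySem.List.mem_enumerate_iff,
    decide_eq_true_eq]
  unfold pvBC
  simp only [List.mem_range]
  constructor
  · rintro ⟨s, ⟨pr, ⟨a, ha, rfl⟩, q, ⟨b, hb, rfl⟩, hsome⟩, hle⟩
    by_cases hv : p[a][b] = "V"
    · rw [if_pos hv] at hsome
      obtain rfl := (Option.some.injEq _ _).mp hsome
      refine ⟨a, ha, b, ?_, ?_, ?_⟩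
      · rw [pvGetD_row p a ha]; exact hb
      · rw [pvGetD_row p a ha, pvGetD_cell _ b hb]; exact hv
      · simp only [zero_add] at hle ⊢
        rw [pvDist_natAbs i a, pvDist_natAbs j b] at hle
        exact_mod_cast hle
    · rw [if_neg hv] at hsome
      exact absurd hsome (by simp)
  · rintro ⟨a, ha, b, hb, hv, hle⟩
    rw [pvGetD_row p a ha] at hb hv
    rw [pvGetD_cell _ b hb] at hv
    refine ⟨((0:Int) + (a : Int), (0:Int) + (b : Int)),
      ⟨((0:Int) + (a : Int), p[a]), ⟨a, ha, rfl⟩, ((0:Int) + (b : Int), p[a][b]),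
        ⟨b, hb, rfl⟩, by rw [if_pos hv]⟩, ?_⟩
    simp only [zero_add]
    rw [pvDist_natAbs i a, pvDist_natAbs j b]
    exact_mod_cast hle

-- B's output, cell by cell
theorem pvAlt_eq (p : List (List String)) (n : Int) :
    deadly_virus_alt p n = (List.range p.length).map (fun i =>
      (List.range (p.getD i []).length).map (fun j =>
        if pvBC p n i j then "V" else (p.getD i []).getD j "")) := by
  apply List.ext_getElem
  · simp [deadly_virus_alt]
  · intro i h1 h2
    have hi : i < p.length := by simpa using h2
    simp only [deadly_virus_alt, List.getElem_map, List.getElem_range,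
      PySem.List.getElem_enumerate]
    apply List.ext_getElem
    · simp only [List.length_map, PySem.List.length_enumerate, List.length_range,
        pvGetD_row p i hi]
    · intro j hj1 hj2
      have hj : j < p[i].length := by simpa using hj1
      simp only [List.getElem_map, List.getElem_range, PySem.List.getElem_enumerate]
      have hgd : (p.getD i []).getD j "" = p[i][j] := by
        rw [pvGetD_row p i hi, List.getD_eq_getElem?_getD, List.getElem?_eq_getElem hj]; rfl
      by_cases hc : pvBC p n i j
      · rw [if_pos ((pvAny_iff p n i j).mpr hc), if_pos hc]
      · rw [if_neg (fun h => hc ((pvAny_iff p n i j).mp h)), if_neg hc, hgd]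

-- for n ≤ 0, B is a copy (distance 0 means the cell itself, already 'V')
theorem pvAlt_copy (p : List (List String)) (n : Int) (hn : n ≤ 0) :
    deadly_virus_alt p n = p := by
  rw [pvAlt_eq p n]
  apply List.ext_getElem
  · simp
  · intro i h1 h2
    have hi : i < p.length := by simpa using h1
    simp only [List.getElem_map, List.getElem_range]
    apply List.ext_getElem
    · rw [List.length_map, List.length_range, pvGetD_row p i hi]
    · intro j hj1 hj2
      simp only [List.getElem_map, List.getElem_range]
      have hgd : (p.getD i []).getD j "" = p[i][j] := by
        rw [pvGetD_row p i hi, List.getD_eq_getElem?_getD, List.getElem?_eq_getElem hj2]; rfl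
      by_cases hc : pvBC p n i j
      · rw [if_pos hc]
        obtain ⟨a, ha, b, hb, hv, hle⟩ := hc
        have hz : pvDist i a + pvDist j b = 0 := by omega
        have hab : a = i ∧ b = j := by simp [pvDist] at hz; omega
        rw [hab.1, hab.2] at hv
        rw [← hv, hgd]
      · rw [if_neg hc, hgd]

-- on a rectangular grid the condition B tests is pvInf
theorem pvBC_iff_inf (p : List (List String)) (n : Int)
    (hq : ∀ row ∈ p, row.length = (p.headD []).length) (hn : 0 ≤ n)
    (i j : Nat) : pvBC p n i j ↔ pvInf p n.toNat i j := by
  unfold pvBC pvInf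
  simp only [List.mem_range]
  have hlen : ∀ a, a < p.length → (p.getD a []).length = (p.headD []).length := by
    intro a ha
    rw [pvGetD_row p a ha]
    exact hq _ (List.getElem_mem ha)
  constructor
  · rintro ⟨a, ha, b, hb, hv, hle⟩
    exact ⟨a, ha, b, by rw [hlen a ha] at hb; omega, hv, by omega⟩
  · rintro ⟨a, ha, b, hb, hv, hle⟩
    exact ⟨a, ha, b, by rw [hlen a ha]; omega, hv, by omega⟩

theorem pvMain (p : List (List String)) (n : Int)
    (hq : ∀ row ∈ p, row.length = (p.headD []).length) (hn : 0 < n) :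
    deadly_virus p n = deadly_virus_alt p n := by
  have hr : pvRect p := fun row hrow => (hq row hrow).ge
  rw [pvA_eq_iter, pvAlt_eq p n]
  obtain ⟨hSh, hForm⟩ := pvIter_char p hr n.toNat
  apply List.ext_getElem
  · simp [hSh.1]
  · intro i h1 h2
    have hi : i < p.length := by simpa using h2
    have hiter : i < ((fun g => pvStep g g)^[n.toNat] p).length := by rw [hSh.1]; exact hi
    simp only [List.getElem_map, List.getElem_range]
    apply List.ext_getElem
    · simp only [List.length_map, List.length_range]
      rw [← pvGetD_row _ i hiter, hSh.2 i, pvGetD_row p i hi]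
    · intro j hj1 hj2
      simp only [List.getElem_map, List.getElem_range]
      have hLl : ((fun g => pvStep g g)^[n.toNat] p)[i][j] =
          pvGet2 ((fun g => pvStep g g)^[n.toNat] p) i j := by
        rw [pvGet2, pvGetD_row _ i hiter, List.getD_eq_getElem?_getD,
          List.getElem?_eq_getElem hj1]
        rfl
      have hw : j < (p.headD []).length := by
        have hj2' : j < (p.getD i []).length := by simpa using hj2
        rw [pvGetD_row p i hi] at hj2'
        have := hq _ (List.getElem_mem hi)
        omega
      rw [hLl, hForm i j]
      have hiff := pvBC_iff_inf p n hq (by omega) i j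
      by_cases hc : pvBC p n i j
      · rw [if_pos hc, if_pos ⟨hi, hw, hiff.mp hc⟩]
      · rw [if_neg hc, if_neg (fun h => hc (hiff.mpr h.2.2))]
        rfl

-- ===== VERDICT (by name: the statement is the Claim_ definition above) =====
theorem deadly_virus_spec : Claim_equal_deadly_virus := by
  intro persons n _ hpre
  unfold Spec_deadly_virus
  rcases (by omega : n ≤ 0 ∨ 0 < n) with hn | hn
  · rw [pvA_eq_iter, pvAlt_copy persons n hn]
    have : n.toNat = 0 := by omega
    rw [this]; rfl
  · rcases hpre with hle | hrect
    · omega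
    · exact pvMain persons n hrect hn
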